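-- pv_equiv track=rewrite | github.com/igroman787/mytonctrl_bot | utils.py | find_text_in_list
-- ===== SOURCE A (Python) =====
-- def find_text_in_list(inputList, text):
-- 	result = None
-- 	if text is None:
-- 		return result
-- 	textLen = len(text)
-- 	for item in inputList:
-- 		itemLen = len(item)
-- 		start = itemLen-textLen
-- 		buff = item[start:itemLen]
-- 		if text == buff:
-- 			result = item
-- 	return result
-- ===== SOURCE B (Python) =====
-- def find_text_in_list(inputList, text):
-- 	if text is None:
-- 		return None
-- 	for item in reversed(inputList):
-- 		if item.endswith(text):
-- 			return item
-- 	return None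
-- ===== Notes on version B (the rewrite author's own statement) =====
-- stated objective: simpler
-- what changed: B scans the list in reverse and returns on the first suffix match via str.endswith, removing A's result accumulator, manual slice arithmetic and full-list scan.
import Mathlib
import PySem

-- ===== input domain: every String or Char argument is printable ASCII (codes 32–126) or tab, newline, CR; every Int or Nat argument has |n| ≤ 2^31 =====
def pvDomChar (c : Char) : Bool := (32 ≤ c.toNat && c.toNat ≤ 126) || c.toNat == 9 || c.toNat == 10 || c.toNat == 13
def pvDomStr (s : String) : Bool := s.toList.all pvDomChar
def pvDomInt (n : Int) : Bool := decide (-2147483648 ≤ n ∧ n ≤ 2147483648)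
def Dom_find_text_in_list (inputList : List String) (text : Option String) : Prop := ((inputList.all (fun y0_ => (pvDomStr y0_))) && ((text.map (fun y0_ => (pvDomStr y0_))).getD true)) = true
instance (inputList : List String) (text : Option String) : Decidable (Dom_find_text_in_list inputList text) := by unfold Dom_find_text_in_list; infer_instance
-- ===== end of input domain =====

-- B scans the list in reverse and returns the first suffix match (str.endswith),
-- removing A's result accumulator and manual slice arithmetic; objective: simpler.


-- ===== PORT A =====
def find_text_in_list (inputList : List String) (text : Option String) : Option String :=
  match text with
  | none => none
  | some t =>
    let textLen : Int := (PySem.Str.len t : Int)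
    inputList.foldl (fun result item =>
      let itemLen : Int := (PySem.Str.len item : Int)
      let start : Int := itemLen - textLen
      let buff := PySem.Str.slice item (some start) (some itemLen)
      if t == buff then some item else result) none

-- ===== PORT B =====
-- first item of the (already reversed) list ending with t; early return
def pvRevScan (t : String) : List String → Option String
  | [] => none
  | item :: rest => if PySem.Str.endswith item t then some item else pvRevScan t rest

def find_text_in_list_alt (inputList : List String) (text : Option String) : Option String :=
  match text with
  | none => none
  | some t => pvRevScan t inputList.reverse

-- ===== PRECONDITION & SPEC =====
def Spec_find_text_in_list (inputList : List String) (text : Option String) (out : Option String) : Prop := out = find_text_in_list_alt inputList text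
instance (inputList : List String) (text : Option String) (out : Option String) : Decidable (Spec_find_text_in_list inputList text out) := by unfold Spec_find_text_in_list; infer_instance

-- ===== CLAIM (what is proved, stated in full; the proofs are below) =====
def Claim_equal_find_text_in_list : Prop := ∀ (inputList : List String) (text : Option String), Dom_find_text_in_list inputList text → Spec_find_text_in_list inputList text (find_text_in_list inputList text)

-- ===== LEMMAS AND PROOFS =====

-- A's slice test "t == item[len(item)-len(text):len(item)]" is exactly endswith.
theorem slice_suffix (u s : List Char) :
    u = PySem.List.slice s (some ((s.length : Int) - (u.length : Int))) (some (s.length : Int)) ↔ u <:+ s := by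
  rcases Nat.lt_or_ge s.length u.length with hk | hk
  · constructor
    · intro h
      exfalso
      have hlen := congrArg List.length h
      rw [PySem.List.length_slice] at hlen
      have h1 := PySem.List.clampIdx_le s.length ((s.length : Int))
      omega
    · intro h
      exfalso
      have := h.length_le
      omega
  · have ha : ((s.length : Int) - (u.length : Int)) = ((s.length - u.length : Nat) : Int) := by omega
    rw [ha, PySem.List.slice_natCast]
    have hl : (s.drop (s.length - u.length)).take (s.length - (s.length - u.length)) = s.drop (s.length - u.length) := by
      apply List.take_of_length_le
      simp
    rw [hl, List.suffix_iff_eq_drop]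

theorem cond_eq (t item : String) :
    (t == PySem.Str.slice item (some ((PySem.Str.len item : Int) - (PySem.Str.len t : Int))) (some ((PySem.Str.len item : Int))))
      = PySem.Str.endswith item t := by
  rw [Bool.eq_iff_iff, beq_iff_eq]
  simp only [PySem.Str.endswith_eq, PySem.Chars.endswith_iff]
  rw [← String.toList_inj, PySem.Str.toList_slice, PySem.Chars.slice_eq_listSlice]
  simp only [PySem.Str.len_eq]
  exact slice_suffix t.toList item.toList

theorem revScan_append (t : String) (a : List String) (x : String) :
    pvRevScan t (a ++ [x]) = (pvRevScan t a).or (if PySem.Str.endswith x t then some x else none) := by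
  induction a with
  | nil => simp [pvRevScan]
  | cons y ys ih =>
    by_cases h : PySem.Chars.endswith y.toList t.toList = true <;>
      simp [pvRevScan, h, ih, Option.or]

theorem fold_endswith (t : String) (l : List String) (acc : Option String) :
    l.foldl (fun result item => if PySem.Str.endswith item t then some item else result) acc
      = (pvRevScan t l.reverse).or acc := by
  induction l generalizing acc with
  | nil => simp [pvRevScan]
  | cons x rest ih =>
    simp only [List.foldl_cons, List.reverse_cons, revScan_append, ih]
    cases h : pvRevScan t rest.reverse <;>
      by_cases he : PySem.Chars.endswith x.toList t.toList = true <;>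
      simp [he, Option.or]

theorem fold_eq_revScan (t : String) (l : List String) (acc : Option String) :
    l.foldl (fun result item =>
      let itemLen : Int := (PySem.Str.len item : Int)
      let start : Int := itemLen - (PySem.Str.len t : Int)
      let buff := PySem.Str.slice item (some start) (some itemLen)
      if t == buff then some item else result) acc
    = (pvRevScan t l.reverse).or acc := by
  have hfun : (fun (result : Option String) (item : String) =>
      let itemLen : Int := (PySem.Str.len item : Int)
      let start : Int := itemLen - (PySem.Str.len t : Int)
      let buff := PySem.Str.slice item (some start) (some itemLen)
      if t == buff then some item else result)
      = (fun result item => if PySem.Str.endswith item t then some item else result) := by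
    funext r i
    simp only [cond_eq]
  rw [hfun, fold_endswith]

-- ===== VERDICT (by name: the statement is the Claim_ definition above) =====
theorem find_text_in_list_spec : Claim_equal_find_text_in_list := by
  intro inputList text _
  unfold Spec_find_text_in_list find_text_in_list find_text_in_list_alt
  cases text with
  | none => rfl
  | some t => simpa using fold_eq_revScan t inputList none
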